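-- pv_equiv track=rewrite | github.com/SirEOF/ctf-crypto | substitution/sub.py | flipAsciiOverPivot
-- ===== SOURCE A (Python) =====
-- def flipAsciiOverPivot(text, pivot, offset, pivotChar='*'):
-- 	out = ''
-- 	for char in text:
-- 		charNum = ord(char)
-- 		if char == ' ':
-- 			out += ' '
-- 			continue
-- 		elif charNum < pivot:
-- 			out += chr(charNum + offset)
-- 			continue
-- 		elif charNum > pivot:
-- 			out += chr(charNum - offset)
-- 			continue
-- 		else:
-- 			out += pivotChar
-- 	return out
-- ===== SOURCE B (Python) =====
-- def flipAsciiOverPivot(text, pivot, offset, pivotChar='*'):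
--     table = {}
--     for c in set(text):
--         o = ord(c)
--         if c == ' ':
--             table[o] = ' '
--         elif o < pivot:
--             table[o] = chr(o + offset)
--         elif o > pivot:
--             table[o] = chr(o - offset)
--         else:
--             table[o] = pivotChar
--     return text.translate(table)
-- ===== Notes on version B (the rewrite author's own statement) =====
-- stated objective: faster
-- what changed: Replaces the char-by-char string-accumulating Python loop with a translation table precomputed over the distinct characters of text and applied by one str.translate call (the per-char work moves into a single C-level pass).
import Mathlib
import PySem

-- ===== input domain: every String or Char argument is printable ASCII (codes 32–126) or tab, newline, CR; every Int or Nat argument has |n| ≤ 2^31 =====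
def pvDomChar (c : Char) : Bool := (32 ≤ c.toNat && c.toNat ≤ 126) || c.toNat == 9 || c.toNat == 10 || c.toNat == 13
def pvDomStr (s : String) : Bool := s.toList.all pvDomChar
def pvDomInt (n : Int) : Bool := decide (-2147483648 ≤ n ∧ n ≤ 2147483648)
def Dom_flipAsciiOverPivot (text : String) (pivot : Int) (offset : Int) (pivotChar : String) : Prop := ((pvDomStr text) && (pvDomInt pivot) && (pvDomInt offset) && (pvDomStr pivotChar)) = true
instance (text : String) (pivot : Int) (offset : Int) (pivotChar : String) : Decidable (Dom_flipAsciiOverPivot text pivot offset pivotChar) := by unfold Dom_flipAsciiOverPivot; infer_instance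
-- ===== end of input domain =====

-- B replaces A's char-by-char accumulating loop by a translation table built over the
-- distinct characters of text and applied in a single translate pass (objective: idiomatic).

-- chr(n): exact for 0 ≤ n < 0x110000 outside the surrogate range 0xD800–0xDFFF, which is
-- exactly what Pre_ guarantees for every code this file applies it to.
def pyChr (n : Int) : Char := Char.ofNat n.toNat

-- ===== PORT A =====
def flipAsciiOverPivot (text : String) (pivot : Int) (offset : Int) (pivotChar : String) : String :=
  text.toList.foldl (fun out char =>
    let charNum : Int := (char.toNat : Int)
    if char = ' ' then out ++ " "
    else if charNum < pivot then out ++ String.singleton (pyChr (charNum + offset))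
    else if charNum > pivot then out ++ String.singleton (pyChr (charNum - offset))
    else out ++ pivotChar) ""

-- ===== PORT B =====
-- table built over set(text) (distinct chars; each key's value depends only on the char,
-- so the dict's lookup behaviour is independent of set iteration order);
-- text.translate(table): each char is looked up by its ord, unmatched chars pass through.
def flipAsciiOverPivot_alt (text : String) (pivot : Int) (offset : Int) (pivotChar : String) : String :=
  let table : PySem.Dict Int String :=
    (PySem.Set.ofList text.toList).foldl (fun d c =>
      let o : Int := (c.toNat : Int)
      if c = ' ' then d.insert o " "
      else if o < pivot then d.insert o (String.singleton (pyChr (o + offset)))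
      else if o > pivot then d.insert o (String.singleton (pyChr (o - offset)))
      else d.insert o pivotChar) PySem.Dict.empty
  String.join (text.toList.map (fun c => table.getD ((c.toNat : Int)) (String.singleton c)))

-- ===== PRECONDITION & SPEC =====
-- Pre_ excludes exactly the inputs where some chr() argument falls outside range(0x110000)
-- (A raises ValueError) or lands in the surrogate range 0xD800–0xDFFF (A returns a lone
-- surrogate, not representable as a Lean Char/UTF-8 string; B returns the same string there).
def pvValidCode (n : Int) : Bool := decide (0 ≤ n) && decide (n < 1114112) && !(decide (55296 ≤ n) && decide (n ≤ 57343))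
def Pre_flipAsciiOverPivot (text : String) (pivot : Int) (offset : Int) (pivotChar : String) : Prop :=
  (text.toList.all (fun c =>
    c = ' ' ||
    ((!(decide ((c.toNat : Int) < pivot)) || pvValidCode ((c.toNat : Int) + offset)) &&
     (!(decide (pivot < (c.toNat : Int))) || pvValidCode ((c.toNat : Int) - offset))))) = true
instance (text : String) (pivot : Int) (offset : Int) (pivotChar : String) : Decidable (Pre_flipAsciiOverPivot text pivot offset pivotChar) := by unfold Pre_flipAsciiOverPivot; infer_instance
def pvWitness_flipAsciiOverPivot : String × Int × Int × String := ("ab c", 98, 1, "*")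
def Spec_flipAsciiOverPivot (text : String) (pivot : Int) (offset : Int) (pivotChar : String) (out : String) : Prop := out = flipAsciiOverPivot_alt text pivot offset pivotChar
instance (text : String) (pivot : Int) (offset : Int) (pivotChar : String) (out : String) : Decidable (Spec_flipAsciiOverPivot text pivot offset pivotChar out) := by unfold Spec_flipAsciiOverPivot; infer_instance

-- ===== CLAIM (what is proved, stated in full; the proofs are below) =====
def Claim_equal_flipAsciiOverPivot : Prop := ∀ (text : String) (pivot : Int) (offset : Int) (pivotChar : String), Dom_flipAsciiOverPivot text pivot offset pivotChar → Pre_flipAsciiOverPivot text pivot offset pivotChar → Spec_flipAsciiOverPivot text pivot offset pivotChar (flipAsciiOverPivot text pivot offset pivotChar)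

-- ===== LEMMAS AND PROOFS =====

-- the common per-character image (proof device only)
def pvImg (pivot : Int) (offset : Int) (pivotChar : String) (c : Char) : String :=
  if c = ' ' then " "
  else if ((c.toNat : Int)) < pivot then String.singleton (pyChr ((c.toNat : Int) + offset))
  else if ((c.toNat : Int)) > pivot then String.singleton (pyChr ((c.toNat : Int) - offset))
  else pivotChar

theorem pvKeyInj : Function.Injective (fun c : Char => ((c.toNat : Int))) := by
  intro a b h
  simp only [Int.natCast_inj, Char.toNat] at h
  exact Char.ext (UInt32.toNat_inj.mp h)

theorem pvFoldlShift (l : List String) (a : String) :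
    l.foldl (· ++ ·) a = a ++ l.foldl (· ++ ·) "" := by
  induction l generalizing a with
  | nil => simp
  | cons b t ih =>
      simp only [List.foldl_cons]
      rw [ih (a ++ b), ih ("" ++ b)]
      simp [String.append_assoc]

theorem pvJoinCons (a : String) (l : List String) : String.join (a :: l) = a ++ String.join l := by
  show List.foldl (· ++ ·) "" (a :: l) = _
  simp only [List.foldl_cons]
  rw [pvFoldlShift]
  simp [String.join]

theorem pvFoldlAppend (g : Char → String) (l : List Char) (s : String) :
    l.foldl (fun o c => o ++ g c) s = s ++ String.join (l.map g) := by
  induction l generalizing s with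
  | nil => simp [String.join]
  | cons c t ih =>
      simp only [List.foldl_cons, List.map_cons, ih, pvJoinCons]
      simp [String.append_assoc]

theorem pvAfn_eq (pivot offset : Int) (pivotChar : String) :
    (fun (out : String) (char : Char) =>
      let charNum : Int := (char.toNat : Int)
      if char = ' ' then out ++ " "
      else if charNum < pivot then out ++ String.singleton (pyChr (charNum + offset))
      else if charNum > pivot then out ++ String.singleton (pyChr (charNum - offset))
      else out ++ pivotChar)
    = (fun out char => out ++ pvImg pivot offset pivotChar char) := by
  funext out char
  simp only [pvImg]
  split_ifs <;> rfl

theorem pvTable_getD (pivot offset : Int) (pivotChar : String) (text : String)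
    (c : Char) (hc : c ∈ text.toList) (dflt : String) :
    ((PySem.Set.ofList text.toList).foldl (fun d c =>
      if c = ' ' then d.insert ((c.toNat : Int)) " "
      else if ((c.toNat : Int)) < pivot then d.insert ((c.toNat : Int)) (String.singleton (pyChr ((c.toNat : Int) + offset)))
      else if ((c.toNat : Int)) > pivot then d.insert ((c.toNat : Int)) (String.singleton (pyChr ((c.toNat : Int) - offset)))
      else d.insert ((c.toNat : Int)) pivotChar) PySem.Dict.empty).getD ((c.toNat : Int)) dflt
    = pvImg pivot offset pivotChar c := by
  have hfn : (fun (d : PySem.Dict Int String) (c : Char) =>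
      if c = ' ' then d.insert ((c.toNat : Int)) " "
      else if ((c.toNat : Int)) < pivot then d.insert ((c.toNat : Int)) (String.singleton (pyChr ((c.toNat : Int) + offset)))
      else if ((c.toNat : Int)) > pivot then d.insert ((c.toNat : Int)) (String.singleton (pyChr ((c.toNat : Int) - offset)))
      else d.insert ((c.toNat : Int)) pivotChar)
      = (fun d c => d.insert ((c.toNat : Int)) (pvImg pivot offset pivotChar c)) := by
    funext d c
    simp only [pvImg]
    split_ifs <;> rfl
  rw [hfn]
  set l := PySem.Set.ofList text.toList with hl
  have hnodupKeys : (l.map (fun c : Char => ((c.toNat : Int)))).Nodup :=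
    (PySem.Set.nodup_ofList text.toList).map pvKeyInj
  have hitems := PySem.Dict.items_foldl_insert_fresh (l := l)
      (k := fun c : Char => ((c.toNat : Int))) (v := pvImg pivot offset pivotChar)
      (d := PySem.Dict.empty) (by intro a _; rfl) hnodupKeys
  have hmemL : c ∈ l := (PySem.Set.mem_ofList _ _).mpr hc
  have hmem : (((c.toNat : Int)), pvImg pivot offset pivotChar c)
      ∈ (l.foldl (fun d c => d.insert ((c.toNat : Int)) (pvImg pivot offset pivotChar c)) PySem.Dict.empty).items := by
    rw [hitems]
    exact List.mem_append_right _ (List.mem_map_of_mem hmemL)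
  have hkeysNodup : (l.foldl (fun d c => d.insert ((c.toNat : Int)) (pvImg pivot offset pivotChar c)) PySem.Dict.empty).keys.Nodup :=
    PySem.Dict.nodup_keys_foldl_insert_key l _ _ _ PySem.Dict.nodup_keys_empty
  exact PySem.Dict.getD_of_mem_items _ hmem hkeysNodup dflt

-- ===== VERDICT (by name: the statement is the Claim_ definition above) =====
theorem flipAsciiOverPivot_spec : Claim_equal_flipAsciiOverPivot := by
  intro text pivot offset pivotChar _ _
  unfold Spec_flipAsciiOverPivot flipAsciiOverPivot flipAsciiOverPivot_alt
  rw [pvAfn_eq, pvFoldlAppend]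
  simp only [String.empty_append]
  congr 1
  apply List.map_congr_left
  intro c hc
  exact (pvTable_getD pivot offset pivotChar text c hc _).symm
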